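-- pv_equiv track=rewrite | github.com/AhsanAyub/static_ransomware_analysis | exploratory_analysis/main.py | import_address_tables_info
-- ===== SOURCE A (Python) =====
-- def import_address_tables_info(dataset):
--     ''' Explore the distribution of the import table tables in terms of the unique number
--     of libraries and imports used '''
--
--     unique_libraries_used = []
--     unique_imports_used = []
--
--     for sample in dataset:
--         try:
--             for libraries_used in dataset[sample]['pe_static_analyzer']['libraries_list']:
--                 if (libraries_used in unique_libraries_used):
--                     continue
--                 unique_libraries_used.append(libraries_used)
--         except:
--             pass
--
--         try:
--             for imports_used in dataset[sample]['pe_static_analyzer']['imports_list']: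
--                 if (imports_used in unique_imports_used):
--                     continue
--                 unique_imports_used.append(imports_used)
--         except:
--             pass
--
--     return unique_libraries_used, unique_imports_used
-- ===== SOURCE B (Python) =====
-- def import_address_tables_info(dataset):
--     ''' Gather all libraries/imports in one flat pass, then dedup once
--     preserving first-seen order with dict.fromkeys. '''
--     all_libraries = []
--     all_imports = []
--     for sample in dataset:
--         try:
--             all_libraries.extend(dataset[sample]['pe_static_analyzer']['libraries_list'])
--         except:
--             pass
--         try:
--             all_imports.extend(dataset[sample]['pe_static_analyzer']['imports_list'])
--         except:
--             pass
--     return list(dict.fromkeys(all_libraries)), list(dict.fromkeys(all_imports))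
-- ===== Notes on version B (the rewrite author's own statement) =====
-- stated objective: idiomatic
-- what changed: Replaces A's interleaved membership-guarded appends (a linear scan of the accumulator per item) with a flat gather phase followed by a single order-preserving dict.fromkeys dedup pass.
import Mathlib
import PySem

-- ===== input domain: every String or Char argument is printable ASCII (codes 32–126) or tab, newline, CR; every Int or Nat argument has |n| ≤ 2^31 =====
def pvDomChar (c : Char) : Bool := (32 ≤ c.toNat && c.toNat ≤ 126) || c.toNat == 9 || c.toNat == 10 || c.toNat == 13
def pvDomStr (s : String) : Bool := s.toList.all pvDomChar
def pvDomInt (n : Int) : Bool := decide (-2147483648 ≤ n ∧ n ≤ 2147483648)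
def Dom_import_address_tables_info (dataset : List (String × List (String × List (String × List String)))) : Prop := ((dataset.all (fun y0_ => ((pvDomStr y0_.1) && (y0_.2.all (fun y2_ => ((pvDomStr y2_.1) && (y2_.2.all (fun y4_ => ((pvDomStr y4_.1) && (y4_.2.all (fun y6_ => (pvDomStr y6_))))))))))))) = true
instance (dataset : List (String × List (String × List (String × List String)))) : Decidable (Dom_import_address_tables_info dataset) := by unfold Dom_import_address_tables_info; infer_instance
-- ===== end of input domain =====

-- B gathers everything into flat lists and dedups once with dict.fromkeys (first-seen order),
-- instead of A's membership-guarded appends interleaved into the loop; idiomatic decomposition, same results.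


-- shared lookup helper: dataset[sample]['pe_static_analyzer'][field]; a missing key at any
-- level is the caught exception (A) / caught exception before extend (B) → empty contribution
def pvField (d : PySem.Dict String (List (String × List (String × List String)))) (sample field : String) : List String :=
  match d.get? sample with
  | none => []
  | some inner =>
    match (PySem.Dict.ofList inner).get? "pe_static_analyzer" with
    | none => []
    | some pe =>
      match (PySem.Dict.ofList pe).get? field with
      | none => []
      | some xs => xs

-- ===== PORT A =====
def import_address_tables_info (dataset : List (String × List (String × List (String × List String)))) : List String × List String :=
  let d := PySem.Dict.ofList dataset
  d.keys.foldl (fun (acc : List String × List String) sample =>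
    let ul := (pvField d sample "libraries_list").foldl
      (fun u x => if u.contains x then u else u ++ [x]) acc.1
    let ui := (pvField d sample "imports_list").foldl
      (fun u x => if u.contains x then u else u ++ [x]) acc.2
    (ul, ui)) ([], [])

-- ===== PORT B =====
def import_address_tables_info_alt (dataset : List (String × List (String × List (String × List String)))) : List String × List String :=
  let d := PySem.Dict.ofList dataset
  let all := d.keys.foldl (fun (acc : List String × List String) sample =>
    (acc.1 ++ pvField d sample "libraries_list", acc.2 ++ pvField d sample "imports_list")) ([], [])
  (PySem.List.dedup all.1, PySem.List.dedup all.2)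

-- ===== PRECONDITION & SPEC =====
def Spec_import_address_tables_info (dataset : List (String × List (String × List (String × List String)))) (out : List String × List String) : Prop := out = import_address_tables_info_alt dataset
instance (dataset : List (String × List (String × List (String × List String)))) (out : List String × List String) : Decidable (Spec_import_address_tables_info dataset out) := by unfold Spec_import_address_tables_info; infer_instance

-- ===== CLAIM (what is proved, stated in full; the proofs are below) =====
def Claim_equal_import_address_tables_info : Prop := ∀ (dataset : List (String × List (String × List (String × List String)))), Dom_import_address_tables_info dataset → Spec_import_address_tables_info dataset (import_address_tables_info dataset)

-- ===== LEMMAS AND PROOFS =====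

-- A's membership-guarded append loop is exactly Python-set update (first occurrences kept)
theorem pv_addfold_eq_update (xs : List String) (u : List String) :
    xs.foldl (fun u x => if u.contains x then u else u ++ [x]) u = PySem.Set.update u xs := by
  induction xs generalizing u with
  | nil => rfl
  | cons x xs ih =>
    simp only [List.foldl_cons]
    rw [ih]
    rfl

theorem pv_update_append (u xs ys : List String) :
    PySem.Set.update (PySem.Set.update u xs) ys = PySem.Set.update u (xs ++ ys) := by
  simp [PySem.Set.update, List.foldl_append]

-- B's gather fold from (p, q) just prepends p and q to the gather from ([], [])
theorem pv_gather_shift (d : PySem.Dict String (List (String × List (String × List String))))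
    (ks : List String) (p q : List String) :
    ks.foldl (fun (acc : List String × List String) sample =>
      (acc.1 ++ pvField d sample "libraries_list", acc.2 ++ pvField d sample "imports_list")) (p, q)
    = (p ++ (ks.foldl (fun (acc : List String × List String) sample =>
          (acc.1 ++ pvField d sample "libraries_list", acc.2 ++ pvField d sample "imports_list")) ([], [])).1,
       q ++ (ks.foldl (fun (acc : List String × List String) sample =>
          (acc.1 ++ pvField d sample "libraries_list", acc.2 ++ pvField d sample "imports_list")) ([], [])).2) := by
  induction ks generalizing p q with
  | nil => simp
  | cons m ms ihm =>
    simp only [List.foldl_cons, List.nil_append]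
    rw [ihm, ihm (pvField d m "libraries_list") (pvField d m "imports_list")]
    simp [List.append_assoc]

-- the loop invariant: A's fold from (a, b) = set-update of a and b by B's gathered chunks
theorem pv_loop_eq (d : PySem.Dict String (List (String × List (String × List String))))
    (ks : List String) (a b : List String) :
    ks.foldl (fun (acc : List String × List String) sample =>
      let ul := (pvField d sample "libraries_list").foldl
        (fun u x => if u.contains x then u else u ++ [x]) acc.1
      let ui := (pvField d sample "imports_list").foldl
        (fun u x => if u.contains x then u else u ++ [x]) acc.2
      (ul, ui)) (a, b)
    = (PySem.Set.update a (ks.foldl (fun (acc : List String × List String) sample =>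
          (acc.1 ++ pvField d sample "libraries_list", acc.2 ++ pvField d sample "imports_list")) (([] : List String), ([] : List String))).1,
       PySem.Set.update b (ks.foldl (fun (acc : List String × List String) sample =>
          (acc.1 ++ pvField d sample "libraries_list", acc.2 ++ pvField d sample "imports_list")) (([] : List String), ([] : List String))).2) := by
  induction ks generalizing a b with
  | nil => simp [PySem.Set.update]
  | cons k ks ih =>
    simp only [List.foldl_cons, List.nil_append]
    rw [pv_addfold_eq_update, pv_addfold_eq_update, ih,
      pv_gather_shift d ks (pvField d k "libraries_list") (pvField d k "imports_list"),
      pv_update_append, pv_update_append]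

-- ===== VERDICT (by name: the statement is the Claim_ definition above) =====
theorem import_address_tables_info_spec : Claim_equal_import_address_tables_info := by
  intro dataset _
  unfold Spec_import_address_tables_info import_address_tables_info import_address_tables_info_alt
  simp only []
  rw [pv_loop_eq]
  simp [PySem.List.dedup_eq_ofList, PySem.Set.ofList_eq_foldl, PySem.Set.update]
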